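-- pv_equiv track=rewrite | github.com/thealper2/codewars-solutions | 7-kyu/traffic_count_during_peak_hours.py | traffic_count
-- ===== SOURCE A (Python) =====
-- def traffic_count(array):
--     traffic = {
--         '4:00pm': 0,
--         '5:00pm': 0,
--         '6:00pm': 0,
--         '7:00pm': 0
--     }
--
--     n = len(array)
--     for i in range(n):
--         if i < 6:
--             traffic['4:00pm'] = max(traffic['4:00pm'], array[i])
--         elif i < 12:
--             traffic['5:00pm'] = max(traffic['5:00pm'], array[i])
--         elif i < 18:
--             traffic['6:00pm'] = max(traffic['6:00pm'], array[i])
--         elif i < 24: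
--             traffic['7:00pm'] = max(traffic['7:00pm'], array[i])
--
--     return [(k, v) for k, v in traffic.items()]
-- ===== SOURCE B (Python) =====
-- def traffic_count(array):
--     labels = ['4:00pm', '5:00pm', '6:00pm', '7:00pm']
--     result = []
--     for k, label in enumerate(labels):
--         m = 0
--         for x in array[6 * k : 6 * k + 6]:
--             m = max(m, x)
--         result.append((label, m))
--     return result
-- ===== Notes on version B (the rewrite author's own statement) =====
-- stated objective: faster
-- what changed: Replaces A's index loop over the whole array (4-way if/elif dispatch into a dict) with an outer loop over the four labels that slices each 6-element bucket and reduces it with a running max seeded at 0, so only the first 24 elements are ever visited and no dict is built.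
import Mathlib
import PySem

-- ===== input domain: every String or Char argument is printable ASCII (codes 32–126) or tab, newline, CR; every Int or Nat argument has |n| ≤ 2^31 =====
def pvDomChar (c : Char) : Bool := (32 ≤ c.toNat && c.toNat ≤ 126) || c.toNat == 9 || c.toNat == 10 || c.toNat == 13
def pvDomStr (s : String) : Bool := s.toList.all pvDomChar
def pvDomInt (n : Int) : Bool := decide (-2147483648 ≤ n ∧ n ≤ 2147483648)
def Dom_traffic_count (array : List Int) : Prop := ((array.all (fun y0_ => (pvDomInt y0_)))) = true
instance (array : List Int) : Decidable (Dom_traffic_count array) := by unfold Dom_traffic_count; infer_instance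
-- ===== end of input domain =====

-- B replaces A's index loop over the whole array (if/elif dispatch into a dict) by a loop over the
-- four labels, slicing each 6-element bucket and reducing it with a max seeded at 0, so only the
-- first 24 elements are visited (measured faster on large inputs).


-- ===== PORT A =====
-- the initial dict literal {'4:00pm': 0, …}
def trafficInit : PySem.Dict String Int :=
  ((((PySem.Dict.empty.insert "4:00pm" 0).insert "5:00pm" 0).insert "6:00pm" 0).insert "7:00pm" 0)

-- one iteration of A's loop body; array[i] is always in range here, so pyGetD i 0 = array[i]
def trafficStep (array : List Int) (d : PySem.Dict String Int) (i : Int) : PySem.Dict String Int :=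
  if i < 6 then d.insert "4:00pm" (max (d.getD "4:00pm" 0) (PySem.List.pyGetD array i 0))
  else if i < 12 then d.insert "5:00pm" (max (d.getD "5:00pm" 0) (PySem.List.pyGetD array i 0))
  else if i < 18 then d.insert "6:00pm" (max (d.getD "6:00pm" 0) (PySem.List.pyGetD array i 0))
  else if i < 24 then d.insert "7:00pm" (max (d.getD "7:00pm" 0) (PySem.List.pyGetD array i 0))
  else d

def traffic_count (array : List Int) : List (String × Int) :=
  ((PySem.List.pyRange 0 (array.length : Int) 1).foldl (trafficStep array) trafficInit).items

-- ===== PORT B =====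
def traffic_count_alt (array : List Int) : List (String × Int) :=
  (PySem.List.enumerate ["4:00pm", "5:00pm", "6:00pm", "7:00pm"] 0).map
    (fun p => (p.2,
      (PySem.List.slice array (some (6 * p.1)) (some (6 * p.1 + 6))).foldl (fun m x => max m x) 0))

-- ===== PRECONDITION & SPEC =====
def Spec_traffic_count (array : List Int) (out : List (String × Int)) : Prop := out = traffic_count_alt array
instance (array : List Int) (out : List (String × Int)) : Decidable (Spec_traffic_count array out) := by unfold Spec_traffic_count; infer_instance

-- ===== CLAIM (what is proved, stated in full; the proofs are below) =====
def Claim_equal_traffic_count : Prop := ∀ (array : List Int), Dom_traffic_count array → Spec_traffic_count array (traffic_count array)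

-- ===== LEMMAS AND PROOFS =====

-- a 4-entry dict with the fixed keys, as a literal
def dict4 (a b c e : Int) : PySem.Dict String Int :=
  PySem.Dict.mk [("4:00pm", a), ("5:00pm", b), ("6:00pm", c), ("7:00pm", e)]

-- max over the part of bucket k that the first n elements reach, seeded with 0
def bmax (array : List Int) (n k : Nat) : Int :=
  ((array.drop (6 * k)).take (min (n - 6 * k) 6)).foldl max 0

lemma ins4_0 (a b c e x : Int) : (dict4 a b c e).insert "4:00pm" x = dict4 x b c e := by
  simp [dict4, PySem.Dict.insert, PySem.Dict.contains]
lemma ins4_1 (a b c e x : Int) : (dict4 a b c e).insert "5:00pm" x = dict4 a x c e := by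
  simp [dict4, PySem.Dict.insert, PySem.Dict.contains]
lemma ins4_2 (a b c e x : Int) : (dict4 a b c e).insert "6:00pm" x = dict4 a b x e := by
  simp [dict4, PySem.Dict.insert, PySem.Dict.contains]
lemma ins4_3 (a b c e x : Int) : (dict4 a b c e).insert "7:00pm" x = dict4 a b c x := by
  simp [dict4, PySem.Dict.insert, PySem.Dict.contains]
lemma getD4_0 (a b c e : Int) : (dict4 a b c e).getD "4:00pm" 0 = a := by
  simp [dict4, PySem.Dict.getD, PySem.Dict.get?]
lemma getD4_1 (a b c e : Int) : (dict4 a b c e).getD "5:00pm" 0 = b := by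
  simp [dict4, PySem.Dict.getD, PySem.Dict.get?]
lemma getD4_2 (a b c e : Int) : (dict4 a b c e).getD "6:00pm" 0 = c := by
  simp [dict4, PySem.Dict.getD, PySem.Dict.get?]
lemma getD4_3 (a b c e : Int) : (dict4 a b c e).getD "7:00pm" 0 = e := by
  simp [dict4, PySem.Dict.getD, PySem.Dict.get?]

-- bucket k unchanged when index n is outside [6k, 6k+6)
lemma bmax_stable (array : List Int) (n k : Nat) (h : min (n + 1 - 6 * k) 6 = min (n - 6 * k) 6) :
    bmax array (n + 1) k = bmax array n k := by
  simp [bmax, h]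

-- bucket k absorbs array[n] when 6k ≤ n < 6k+6 and n < length
lemma bmax_step (array : List Int) (n k : Nat) (hlo : 6 * k ≤ n) (hhi : n < 6 * k + 6)
    (hlen : n < array.length) :
    bmax array (n + 1) k = max (bmax array n k) array[n] := by
  have hm1 : min (n + 1 - 6 * k) 6 = (n - 6 * k) + 1 := by omega
  have hm0 : min (n - 6 * k) 6 = n - 6 * k := by omega
  have hidx : n - 6 * k < (array.drop (6 * k)).length := by simp; omega
  have hget : (array.drop (6 * k))[n - 6 * k]'hidx = array[n]'hlen := by
    rw [List.getElem_drop]; congr 1; omega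
  simp only [bmax, hm1, hm0]
  rw [List.take_add_one, List.getElem?_eq_getElem hidx]
  simp [hget]

-- the loop invariant: A's fold over the first n indices yields the four running bucket maxima
lemma loop_inv (array : List Int) (n : Nat) (h : n ≤ array.length) :
    (PySem.List.pyRange 0 (n : Int) 1).foldl (trafficStep array) trafficInit
      = dict4 (bmax array n 0) (bmax array n 1) (bmax array n 2) (bmax array n 3) := by
  induction n with
  | zero => rfl
  | succ n ih =>
    have hn : n ≤ array.length := by omega
    have hsplit : PySem.List.pyRange 0 ((n : Int) + 1) 1
        = PySem.List.pyRange 0 (n : Int) 1 ++ [(n : Int)] :=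
      PySem.List.pyRange_one_succ_right (by positivity)
    have hcast : ((n + 1 : Nat) : Int) = (n : Int) + 1 := by push_cast; ring
    rw [hcast, hsplit, List.foldl_append, ih hn]
    have hget : PySem.List.pyGetD array (n : Int) 0 = array[n]'(by omega) := by
      rw [PySem.List.pyGetD_natCast]; exact List.getD_eq_getElem _ _ (by omega)
    simp only [List.foldl_cons, List.foldl_nil, trafficStep, hget,
      getD4_0, getD4_1, getD4_2, getD4_3]
    by_cases h0 : (n : Int) < 6
    · have hn6 : n < 6 := by exact_mod_cast h0
      rw [if_pos h0, ins4_0, bmax_step array n 0 (by omega) (by omega) (by omega),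
        bmax_stable array n 1 (by omega), bmax_stable array n 2 (by omega),
        bmax_stable array n 3 (by omega)]
    · rw [if_neg h0]
      have hn6 : 6 ≤ n := by omega
      by_cases h1 : (n : Int) < 12
      · have hn12 : n < 12 := by exact_mod_cast h1
        rw [if_pos h1, ins4_1, bmax_step array n 1 (by omega) (by omega) (by omega),
          bmax_stable array n 0 (by omega), bmax_stable array n 2 (by omega),
          bmax_stable array n 3 (by omega)]
      · rw [if_neg h1]
        have hn12 : 12 ≤ n := by omega
        by_cases h2 : (n : Int) < 18
        · have hn18 : n < 18 := by exact_mod_cast h2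
          rw [if_pos h2, ins4_2, bmax_step array n 2 (by omega) (by omega) (by omega),
            bmax_stable array n 0 (by omega), bmax_stable array n 1 (by omega),
            bmax_stable array n 3 (by omega)]
        · rw [if_neg h2]
          have hn18 : 18 ≤ n := by omega
          by_cases h3 : (n : Int) < 24
          · have hn24 : n < 24 := by exact_mod_cast h3
            rw [if_pos h3, ins4_3, bmax_step array n 3 (by omega) (by omega) (by omega),
              bmax_stable array n 0 (by omega), bmax_stable array n 1 (by omega),
              bmax_stable array n 2 (by omega)]
          · rw [if_neg h3]
            have hn24 : 24 ≤ n := by omega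
            rw [bmax_stable array n 0 (by omega), bmax_stable array n 1 (by omega),
              bmax_stable array n 2 (by omega), bmax_stable array n 3 (by omega)]

-- B's bucket value is the full-length bucket maximum
lemma alt_bucket (array : List Int) (k : Nat) :
    (PySem.List.slice array (some (6 * (k : Int))) (some (6 * (k : Int) + 6))).foldl
        (fun m x => max m x) 0 = bmax array array.length k := by
  have h6 : ((6 * k : Nat) : Int) = 6 * (k : Int) := by push_cast; ring
  rw [← h6, show ((6 * k : Nat) : Int) + 6 = ((6 * k + 6 : Nat) : Int) by push_cast; ring,
    PySem.List.slice_natCast]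
  have htake : (array.drop (6 * k)).take (6 * k + 6 - 6 * k)
      = (array.drop (6 * k)).take (min (array.length - 6 * k) 6) := by
    rcases le_or_gt (array.length - 6 * k) 6 with hle | hgt
    · have hlen : (array.drop (6 * k)).length = array.length - 6 * k := by simp
      rw [List.take_of_length_le (by omega), List.take_of_length_le (by omega)]
    · congr 1; omega
  rw [htake]
  rfl

theorem traffic_eq (array : List Int) : traffic_count array = traffic_count_alt array := by
  rw [traffic_count, loop_inv array array.length le_rfl]
  show _ = traffic_count_alt array
  rw [traffic_count_alt]
  simp only [PySem.List.enumerate, List.map]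
  have b0 := alt_bucket array 0
  have b1 := alt_bucket array 1
  have b2 := alt_bucket array 2
  have b3 := alt_bucket array 3
  norm_num at b0 b1 b2 b3 ⊢
  rw [b0, b1, b2, b3]
  rfl

-- ===== VERDICT (by name: the statement is the Claim_ definition above) =====
theorem traffic_count_spec : Claim_equal_traffic_count := by
  intro array _
  exact traffic_eq array
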